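-- pv_equiv track=rewrite | github.com/ariuk44/retake_exam_prep | day_18.py | isMartian
-- ===== SOURCE A (Python) =====
-- def isMartian(arr):
--     count1 = 0
--     count2 = 0
--     for i in range(len(arr)):
--         if arr[i] == 1:
--             count1 += 1
--         if arr[i] == 2:
--             count2 += 1
--         if i > 0 and arr[i] == arr[i-1]:
--             return 0
--     return 1 if count1 > count2 else 0
-- ===== SOURCE B (Python) =====
-- def isMartian(arr):
--     # Divide and conquer: each segment arr[lo:hi] reports (no adjacent equal pair
--     # inside it, signed count of 1s minus 2s); segments merge with one boundary check.
--     def solve(lo, hi):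
--         if hi - lo == 1:
--             x = arr[lo]
--             return True, (1 if x == 1 else -1 if x == 2 else 0)
--         mid = (lo + hi) // 2
--         okL, dL = solve(lo, mid)
--         okR, dR = solve(mid, hi)
--         return okL and okR and arr[mid - 1] != arr[mid], dL + dR
--     if not arr:
--         return 0
--     ok, d = solve(0, len(arr))
--     return 1 if ok and d > 0 else 0
-- ===== Notes on version B (the rewrite author's own statement) =====
-- stated objective: alternative
-- what changed: Replaces the single forward counting loop with early return by a divide-and-conquer recursion: each half-segment returns (no-adjacent-duplicate flag, signed #1s-#2s balance) and segments merge with one boundary comparison; correct because adjacency within a segment splits into adjacency within each half plus the boundary pair, and the balance is additive.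
import Mathlib
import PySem

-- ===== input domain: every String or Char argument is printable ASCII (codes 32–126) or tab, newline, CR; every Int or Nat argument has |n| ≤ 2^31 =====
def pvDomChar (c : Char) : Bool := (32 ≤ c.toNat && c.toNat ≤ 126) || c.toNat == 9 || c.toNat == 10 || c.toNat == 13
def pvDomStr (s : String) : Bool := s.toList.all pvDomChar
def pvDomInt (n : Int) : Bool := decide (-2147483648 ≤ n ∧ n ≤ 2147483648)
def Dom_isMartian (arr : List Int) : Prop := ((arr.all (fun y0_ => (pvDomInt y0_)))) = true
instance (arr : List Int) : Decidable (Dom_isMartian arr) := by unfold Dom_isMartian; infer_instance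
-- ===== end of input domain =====

-- B replaces A's single forward counting loop (with early return on an adjacent equal
-- pair) by a divide-and-conquer recursion merging (adjacency flag, signed 1s-2s balance).


-- ===== PORT A =====
-- the for-loop over range(len(arr)) with counters and early return
def isMartianGo (arr : List Int) (i : Nat) (c1 c2 : Int) : Int :=
  if i < arr.length then
    let x := arr.getD i 0
    let c1' := if x = 1 then c1 + 1 else c1
    let c2' := if x = 2 then c2 + 1 else c2
    if 0 < i ∧ x = arr.getD (i - 1) 0 then 0
    else isMartianGo arr (i + 1) c1' c2'
  else if c1 > c2 then 1 else 0
termination_by arr.length - i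

def isMartian (arr : List Int) : Int := isMartianGo arr 0 0 0

-- ===== PORT B =====
-- divide and conquer on the segment [lo, hi): returns (no adjacent equal pair inside,
-- signed count of 1s minus 2s).  The 'hi ≤ lo' branch is a totality guard only:
-- Source B never calls solve with hi ≤ lo.
def isMartianSolve (arr : List Int) (lo hi : Nat) : Bool × Int :=
  if hi ≤ lo then (true, 0)   -- totality guard, unreachable from isMartian_alt
  else if hi - lo = 1 then
    let x := arr.getD lo 0
    (true, if x = 1 then 1 else if x = 2 then -1 else 0)
  else
    let mid := (lo + hi) / 2
    let l := isMartianSolve arr lo mid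
    let r := isMartianSolve arr mid hi
    (l.1 && r.1 && (arr.getD (mid - 1) 0 != arr.getD mid 0), l.2 + r.2)
termination_by hi - lo
decreasing_by all_goals omega

def isMartian_alt (arr : List Int) : Int :=
  if arr = [] then 0
  else
    let s := isMartianSolve arr 0 arr.length
    if s.1 ∧ s.2 > 0 then 1 else 0

-- ===== PRECONDITION & SPEC =====
def Spec_isMartian (arr : List Int) (out : Int) : Prop := out = isMartian_alt arr
instance (arr : List Int) (out : Int) : Decidable (Spec_isMartian arr out) := by unfold Spec_isMartian; infer_instance

-- ===== CLAIM (what is proved, stated in full; the proofs are below) =====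
def Claim_equal_isMartian : Prop := ∀ (arr : List Int), Dom_isMartian arr → Spec_isMartian arr (isMartian arr)

-- ===== LEMMAS AND PROOFS =====

-- "no adjacent equal pair at an index j with lo < j < hi"
def noAdjB (arr : List Int) (lo hi : Nat) : Bool :=
  decide (∀ j < hi, lo < j → arr.getD j 0 ≠ arr.getD (j - 1) 0)

-- the segment arr[lo:hi]
def sliceB (arr : List Int) (lo hi : Nat) : List Int := (arr.drop lo).take (hi - lo)

def diffB (l : List Int) : Int := (l.count 1 : Int) - (l.count 2 : Int)

lemma drop_eq_cons (arr : List Int) (i : Nat) (h : i < arr.length) :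
    arr.drop i = arr.getD i 0 :: arr.drop (i + 1) := by
  rw [List.drop_eq_getElem_cons h, List.getD_eq_getElem arr 0 h]

lemma sliceB_split (arr : List Int) (lo mid hi : Nat) (h1 : lo ≤ mid) (h2 : mid ≤ hi) :
    sliceB arr lo hi = sliceB arr lo mid ++ sliceB arr mid hi := by
  unfold sliceB
  have h : hi - lo = (mid - lo) + (hi - mid) := by omega
  have h' : lo + (mid - lo) = mid := by omega
  rw [h, List.take_add, List.drop_drop, h']

lemma noAdjB_split (arr : List Int) (lo mid hi : Nat) (h1 : lo < mid) (h2 : mid < hi) :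
    noAdjB arr lo hi =
      (noAdjB arr lo mid && noAdjB arr mid hi && (arr.getD (mid - 1) 0 != arr.getD mid 0)) := by
  unfold noAdjB
  rw [Bool.eq_iff_iff]
  simp only [Bool.and_eq_true, decide_eq_true_eq, bne_iff_ne, ne_eq]
  constructor
  · intro h
    refine ⟨⟨fun j hj2 hj1 => h j (by omega) hj1, fun j hj2 hj1 => h j hj2 (by omega)⟩, ?_⟩
    intro he
    exact h mid h2 h1 (by rw [he])
  · rintro ⟨⟨hL, hR⟩, hm⟩ j hj2 hj1
    by_cases hjm : j < mid
    · exact hL j hjm hj1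
    · by_cases hje : j = mid
      · subst hje; intro he; exact hm he.symm
      · exact hR j hj2 (by omega)

lemma solve_char (arr : List Int) :
    ∀ (n lo hi : Nat), hi - lo ≤ n → lo < hi → hi ≤ arr.length →
    isMartianSolve arr lo hi = (noAdjB arr lo hi, diffB (sliceB arr lo hi)) := by
  intro n
  induction n with
  | zero => intro lo hi hn hlt _; omega
  | succ n ih =>
    intro lo hi hn hlt hle
    rw [isMartianSolve]
    rw [if_neg (by omega)]
    by_cases h1 : hi - lo = 1
    · rw [if_pos h1]
      have hlo : lo < arr.length := by omega
      have hs : sliceB arr lo hi = [arr.getD lo 0] := by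
        unfold sliceB
        rw [h1, drop_eq_cons arr lo hlo]
        simp
      have hna : noAdjB arr lo hi = true := by
        unfold noAdjB
        simp only [decide_eq_true_eq]
        intro j hj2 hj1
        omega
      rw [hs, hna]
      unfold diffB
      simp only [List.count_cons, List.count_nil, beq_iff_eq, Prod.mk.injEq, true_and]
      split_ifs <;> push_cast <;> omega
    · rw [if_neg h1]
      dsimp only
      have hm1 : lo < (lo + hi) / 2 := by omega
      have hm2 : (lo + hi) / 2 < hi := by omega
      rw [ih lo ((lo + hi) / 2) (by omega) hm1 (by omega),
          ih ((lo + hi) / 2) hi (by omega) hm2 hle]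
      rw [noAdjB_split arr lo ((lo + hi) / 2) hi hm1 hm2,
          sliceB_split arr lo ((lo + hi) / 2) hi (by omega) (by omega)]
      unfold diffB
      simp only [List.count_append]
      push_cast
      refine Prod.ext rfl ?_
      simp only
      ring

-- A-side: the loop equals "adjacency from i" + remaining counts
def adjFrom (arr : List Int) (i : Nat) : Bool :=
  if i < arr.length then
    (decide (0 < i) && decide (arr.getD i 0 = arr.getD (i - 1) 0)) || adjFrom arr (i + 1)
  else false
termination_by arr.length - i

lemma go_eq_aux (arr : List Int) :
    ∀ (n i : Nat) (c1 c2 : Int), arr.length - i ≤ n →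
    isMartianGo arr i c1 c2 =
      (if adjFrom arr i then 0
       else if c1 + (((arr.drop i).count 1 : Int)) > c2 + (((arr.drop i).count 2 : Int))
         then (1 : Int) else 0) := by
  intro n
  induction n with
  | zero =>
    intro i c1 c2 hle
    have h : ¬ i < arr.length := by omega
    rw [isMartianGo, adjFrom, if_neg h, if_neg h]
    have hd : arr.drop i = [] := List.drop_eq_nil_of_le (by omega)
    simp [hd]
  | succ n ih =>
    intro i c1 c2 hle
    by_cases h : i < arr.length
    · rw [isMartianGo, adjFrom, if_pos h, if_pos h]
      by_cases hadj : 0 < i ∧ arr.getD i 0 = arr.getD (i - 1) 0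
      · obtain ⟨h0, he⟩ := hadj
        simp only [List.getD_eq_getElem?_getD] at he
        simp [h0, he]
      · have hb : (decide (0 < i) && decide (arr.getD i 0 = arr.getD (i - 1) 0)) = false := by
          simp only [Bool.and_eq_false_iff, decide_eq_false_iff_not]
          by_cases h0 : 0 < i
          · right; intro he; exact hadj ⟨h0, he⟩
          · left; exact h0
        simp only [if_neg hadj, hb, Bool.false_or]
        rw [ih (i + 1) _ _ (by omega)]
        by_cases ha : adjFrom arr (i + 1)
        · simp [ha]
        · have hd : arr.drop i = arr.getD i 0 :: arr.drop (i + 1) := drop_eq_cons arr i h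
          simp only [ha, if_false, hd, List.count_cons, Bool.false_eq_true, beq_iff_eq]
          push_cast
          split_ifs <;> omega
    · rw [isMartianGo, adjFrom, if_neg h, if_neg h]
      have hd : arr.drop i = [] := List.drop_eq_nil_of_le (by omega)
      simp [hd]

lemma adjFrom_eq_not_noAdj (arr : List Int) :
    ∀ (n i : Nat), arr.length - i ≤ n →
    adjFrom arr i = !(decide (∀ j, i ≤ j → j < arr.length → 0 < j →
        arr.getD j 0 ≠ arr.getD (j - 1) 0)) := by
  intro n
  induction n with
  | zero =>
    intro i hle
    have h : ¬ i < arr.length := by omega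
    rw [adjFrom, if_neg h]
    simp only [Bool.false_eq, Bool.not_eq_false', decide_eq_true_eq]
    intro j hj1 hj2
    omega
  | succ n ih =>
    intro i hle
    by_cases h : i < arr.length
    · rw [adjFrom, if_pos h, ih (i + 1) (by omega)]
      rw [Bool.eq_iff_iff]
      simp only [Bool.or_eq_true, Bool.and_eq_true, decide_eq_true_eq,
        Bool.not_eq_false', Bool.not_eq_true', decide_eq_false_iff_not, not_forall]
      constructor
      · rintro (⟨h0, he⟩ | ⟨j, hj1, hj2, hj0, he⟩)
        · exact ⟨i, le_refl i, h, h0, not_not_intro he⟩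
        · exact ⟨j, by omega, hj2, hj0, he⟩
      · rintro ⟨j, hj1, hj2, hj0, he⟩
        by_cases hji : j = i
        · subst hji
          exact Or.inl ⟨hj0, not_not.mp he⟩
        · exact Or.inr ⟨j, by omega, hj2, hj0, he⟩
    · rw [adjFrom, if_neg h]
      simp only [Bool.false_eq, Bool.not_eq_false', decide_eq_true_eq]
      intro j hj1 hj2
      omega

lemma noAdjB_zero (arr : List Int) :
    noAdjB arr 0 arr.length = !(adjFrom arr 0) := by
  rw [adjFrom_eq_not_noAdj arr arr.length 0 (by omega), Bool.not_not]
  unfold noAdjB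
  rw [decide_eq_decide]
  constructor
  · intro h j _ hj2 hj0; exact h j hj2 hj0
  · intro h j hj2 hj0; exact h j (by omega) hj2 hj0

-- ===== VERDICT (by name: the statement is the Claim_ definition above) =====
theorem isMartian_spec : Claim_equal_isMartian := by
  intro arr _
  unfold Spec_isMartian isMartian isMartian_alt
  rw [go_eq_aux arr arr.length 0 0 0 (by omega)]
  by_cases he : arr = []
  · subst he; simp [adjFrom]
  · rw [if_neg he]
    have hlen : 0 < arr.length := List.length_pos_iff.mpr he
    rw [solve_char arr arr.length 0 arr.length (by omega) hlen (le_refl _)]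
    simp only [noAdjB_zero]
    have hs : sliceB arr 0 arr.length = arr := by
      unfold sliceB; simp
    rw [hs]
    unfold diffB
    by_cases ha : adjFrom arr 0
    · simp [ha]
    · simp only [ha, if_false, Bool.not_false, Bool.false_eq_true, List.drop_zero, zero_add,
        true_and, gt_iff_lt, sub_pos]
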